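-- pv_equiv track=rewrite | github.com/sohilgoswami/jkss | backend/webscraper.py | collect_data_between_117_and_119
-- ===== SOURCE A (Python) =====
-- def collect_data_between_117_and_119(pdf_text):
--     data_collected1 = False
--     collected_data1 = []
--     for line in pdf_text.split("\n"):
--         if "CHEM-117" in line:
--             data_collected1 = True
--         elif "CHEM-119" in line:
--             data_collected1 = False
--             break
--
--         if data_collected1:
--             collected_data1.append(line)
--
--     return collected_data1
-- ===== SOURCE B (Python) =====
-- def collect_data_between_117_and_119(pdf_text):
--     lines = pdf_text.split("\n")
--     start = next((i for i, l in enumerate(lines) if "CHEM-117" in l), None)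
--     end = next((j for j, l in enumerate(lines)
--                 if "CHEM-119" in l and "CHEM-117" not in l), None)
--     if start is None or (end is not None and end < start):
--         return []
--     return lines[start:end]
-- ===== Notes on version B (the rewrite author's own statement) =====
-- stated objective: alternative
-- what changed: B computes the two boundary indices (first CHEM-117 line, first CHEM-119-without-CHEM-117 line) with two scans and returns one slice, instead of A's single pass maintaining a collecting flag and appending line by line.
import Mathlib
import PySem

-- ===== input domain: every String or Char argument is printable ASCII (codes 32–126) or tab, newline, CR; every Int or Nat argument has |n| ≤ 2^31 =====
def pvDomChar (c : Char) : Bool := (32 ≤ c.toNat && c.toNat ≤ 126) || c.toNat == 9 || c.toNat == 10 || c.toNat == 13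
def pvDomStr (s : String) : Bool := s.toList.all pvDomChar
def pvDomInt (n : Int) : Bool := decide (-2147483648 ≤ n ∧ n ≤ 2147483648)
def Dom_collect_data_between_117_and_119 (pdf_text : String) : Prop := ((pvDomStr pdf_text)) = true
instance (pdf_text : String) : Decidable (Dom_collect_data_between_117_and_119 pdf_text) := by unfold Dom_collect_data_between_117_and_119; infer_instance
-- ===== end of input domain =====

-- B computes the two boundary indices and returns one slice instead of A's flag-carrying single pass; objective: alternative decomposition, same cost.


-- ===== PORT A =====
-- A's loop: flag 'data_collected1', accumulator 'collected_data1'; break on a CHEM-119 line without CHEM-117.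
def pvLoopA : List String → Bool → List String → List String
  | [], _, acc => acc
  | l :: ls, flag, acc =>
    if PySem.Str.isIn "CHEM-117" l then
      pvLoopA ls true (acc ++ [l])
    else if PySem.Str.isIn "CHEM-119" l then
      acc
    else if flag then pvLoopA ls flag (acc ++ [l]) else pvLoopA ls flag acc

def collect_data_between_117_and_119 (pdf_text : String) : List String :=
  pvLoopA ((PySem.Str.split? pdf_text "\n").getD []) false []

-- ===== PORT B =====
def pvIs117 (l : String) : Bool := PySem.Str.isIn "CHEM-117" l
def pvStop (l : String) : Bool := PySem.Str.isIn "CHEM-119" l && !(PySem.Str.isIn "CHEM-117" l)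

def collect_data_between_117_and_119_alt (pdf_text : String) : List String :=
  let lines := (PySem.Str.split? pdf_text "\n").getD []
  match lines.findIdx? pvIs117, lines.findIdx? pvStop with
  | none, _ => []
  | some s, some e => if e < s then [] else (lines.drop s).take (e - s)
  | some s, none => lines.drop s

-- ===== PRECONDITION & SPEC =====
def Spec_collect_data_between_117_and_119 (pdf_text : String) (out : List String) : Prop := out = collect_data_between_117_and_119_alt pdf_text
instance (pdf_text : String) (out : List String) : Decidable (Spec_collect_data_between_117_and_119 pdf_text out) := by unfold Spec_collect_data_between_117_and_119; infer_instance

-- ===== CLAIM (what is proved, stated in full; the proofs are below) =====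
def Claim_equal_collect_data_between_117_and_119 : Prop := ∀ (pdf_text : String), Dom_collect_data_between_117_and_119 pdf_text → Spec_collect_data_between_117_and_119 pdf_text (collect_data_between_117_and_119 pdf_text)

-- ===== LEMMAS AND PROOFS =====

-- lines kept once the flag is on: everything before the first stop line
def pvTakeUntil (ls : List String) : List String :=
  match ls.findIdx? pvStop with
  | none => ls
  | some e => ls.take e

-- B's core as a function of the line list
def pvCore (ls : List String) : List String :=
  match ls.findIdx? pvIs117, ls.findIdx? pvStop with
  | none, _ => []
  | some s, some e => if e < s then [] else (ls.drop s).take (e - s)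
  | some s, none => ls.drop s

lemma pvLoopA_true (ls : List String) : ∀ acc, pvLoopA ls true acc = acc ++ pvTakeUntil ls := by
  induction ls with
  | nil => intro acc; simp [pvLoopA, pvTakeUntil]
  | cons l ls ih =>
    intro acc
    cases h7 : PySem.Str.isIn "CHEM-117" l with
    | true =>
      have hs : pvStop l = false := by simp only [pvStop, h7, Bool.not_true, Bool.and_false]
      simp only [pvLoopA, h7, if_true, ih, pvTakeUntil, List.findIdx?_cons, hs]
      cases hf : ls.findIdx? pvStop <;> simp
    | false =>
      cases h9 : PySem.Str.isIn "CHEM-119" l with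
      | true =>
        have hs : pvStop l = true := by simp only [pvStop, h7, h9, Bool.not_false, Bool.and_true]
        simp only [pvLoopA, h7, h9, pvTakeUntil, List.findIdx?_cons, hs]
        simp
      | false =>
        have hs : pvStop l = false := by simp only [pvStop, h9, Bool.false_and]
        simp only [pvLoopA, h7, h9, if_true, ih, pvTakeUntil, List.findIdx?_cons, hs]
        cases hf : ls.findIdx? pvStop <;> simp

lemma pvLoopA_false (ls : List String) : ∀ acc, pvLoopA ls false acc = acc ++ pvCore ls := by
  induction ls with
  | nil => intro acc; simp [pvLoopA, pvCore]
  | cons l ls ih =>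
    intro acc
    cases h7 : PySem.Str.isIn "CHEM-117" l with
    | true =>
      have hs : pvStop l = false := by simp only [pvStop, h7, Bool.not_true, Bool.and_false]
      have h17 : pvIs117 l = true := h7
      simp only [pvLoopA, h7, if_true]
      rw [pvLoopA_true]
      simp only [pvCore, pvTakeUntil, List.findIdx?_cons, hs, h17, if_true]
      cases hf : ls.findIdx? pvStop <;> simp
    | false =>
      have h17 : pvIs117 l = false := h7
      cases h9 : PySem.Str.isIn "CHEM-119" l with
      | true =>
        have hs : pvStop l = true := by simp only [pvStop, h7, h9, Bool.not_false, Bool.and_true]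
        simp only [pvLoopA, h7, h9, if_true]
        simp only [pvCore, List.findIdx?_cons, hs, h17]
        cases hf : ls.findIdx? pvIs117 <;> simp
      | false =>
        have hs : pvStop l = false := by simp only [pvStop, h9, Bool.false_and]
        simp only [pvLoopA, h7, h9, Bool.false_eq_true, if_false]
        rw [ih]
        simp only [pvCore, List.findIdx?_cons, hs, h17]
        cases hf : ls.findIdx? pvIs117 with
        | none => simp
        | some s =>
          cases hg : ls.findIdx? pvStop with
          | none => simp
          | some e => by_cases he : e < s <;> simp [he, Nat.succ_sub_succ]

-- ===== VERDICT (by name: the statement is the Claim_ definition above) =====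
theorem collect_data_between_117_and_119_spec : Claim_equal_collect_data_between_117_and_119 := by
  intro pdf_text _
  show _ = _
  rw [collect_data_between_117_and_119, pvLoopA_false]
  rfl
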